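-- pv_equiv track=rewrite | github.com/YCK-art/data | afterwon-backend/app/services/ai_service.py | _build_dynamic_column_mapping
-- ===== SOURCE A (Python) =====
-- from typing import Dict, Any, List
--
-- def _build_dynamic_column_mapping(available_columns: List[str], semantic_mappings: Dict[str, List[str]]) -> Dict[str, List[str]]:
--     """Build intelligent column mappings based on actual data and semantic understanding"""
--     mappings = {}
--
--     for col in available_columns:
--         col_lower = col.lower().replace('_', ' ').replace('-', ' ')
--         words = col_lower.split()
--
--         # Create mappings for individual words and combinations
--         for i, word1 in enumerate(words):
--             if len(word1) > 2:
--                 mappings[word1] = mappings.get(word1, []) + [col]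
--
--                 # Create two-word combinations
--                 for j in range(i+1, len(words)):
--                     word2 = words[j]
--                     if len(word2) > 2:
--                         composite = f"{word1} {word2}"
--                         mappings[composite] = mappings.get(composite, []) + [col]
--
--     return mappings
-- ===== SOURCE B (Python) =====
-- from typing import Dict, List
--
-- def _build_dynamic_column_mapping(available_columns: List[str], semantic_mappings: Dict[str, List[str]]) -> Dict[str, List[str]]:
--     """Build word / word-pair -> column-name-list mappings (idiomatic rewrite)."""
--     mappings = {}
--     for col in available_columns:
--         words = [w for w in col.lower().replace('_', ' ').replace('-', ' ').split() if len(w) > 2]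
--         keys = []
--         while words:
--             w1, *words = words
--             keys.append(w1)
--             keys.extend(f"{w1} {w2}" for w2 in words)
--         for key in keys:
--             mappings.setdefault(key, []).append(col)
--     return mappings
-- ===== Notes on version B (the rewrite author's own statement) =====
-- stated objective: idiomatic
-- what changed: B pre-filters the split words once (dropping words of length <= 2), generates each column's key stream (head word plus its composites with the remaining filtered words) by head/tail destructuring instead of A's index-nested loops with repeated length guards, and records columns with setdefault(...).append instead of A's get-and-reconcatenate dict rebuild.
import Mathlib
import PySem

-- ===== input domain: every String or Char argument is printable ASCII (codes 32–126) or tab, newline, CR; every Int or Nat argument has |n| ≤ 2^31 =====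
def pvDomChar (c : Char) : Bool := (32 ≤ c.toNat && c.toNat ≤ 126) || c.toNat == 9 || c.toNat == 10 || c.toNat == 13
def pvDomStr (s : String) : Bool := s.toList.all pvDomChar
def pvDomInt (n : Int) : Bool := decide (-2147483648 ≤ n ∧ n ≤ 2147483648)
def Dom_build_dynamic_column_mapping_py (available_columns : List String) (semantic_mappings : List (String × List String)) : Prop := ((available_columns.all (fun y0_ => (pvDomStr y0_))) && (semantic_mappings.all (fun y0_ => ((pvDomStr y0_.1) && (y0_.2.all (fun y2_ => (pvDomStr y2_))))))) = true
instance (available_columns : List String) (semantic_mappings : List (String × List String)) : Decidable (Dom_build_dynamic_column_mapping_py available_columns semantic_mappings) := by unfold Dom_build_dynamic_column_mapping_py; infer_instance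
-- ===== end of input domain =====

-- B pre-filters each column's words once and generates the key stream by head/tail
-- destructuring instead of A's index-nested loops with repeated length guards (objective: idiomatic).


-- ===== PORT A =====
-- literal transliteration of A: nested enumerate/range loops with a len>2 guard on each word,
-- dict update by get-and-reconcatenate (mappings[k] = mappings.get(k, []) + [col]); semantic_mappings is unused by A.
def build_dynamic_column_mapping_py (available_columns : List String) (semantic_mappings : List (String × List String)) : List (String × List String) :=
  (available_columns.foldl (fun (m : PySem.Dict String (List String)) col =>
    let words := PySem.Str.split₀ (PySem.Str.replace (PySem.Str.replace (PySem.Str.lower col) "_" " ") "-" " ")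
    (PySem.List.enumerate words).foldl (fun m iw =>
      let word1 := iw.2
      if 2 < PySem.Str.len word1 then
        let m := m.insert word1 (m.getD word1 [] ++ [col])
        (PySem.List.pyRange (iw.1 + 1) (PySem.List.len words) 1).foldl (fun m j =>
          let word2 := PySem.List.pyGetD words j ""
          if 2 < PySem.Str.len word2 then
            let composite := word1 ++ " " ++ word2
            m.insert composite (m.getD composite [] ++ [col])
          else m) m
      else m) m)
    PySem.Dict.empty).items

-- ===== PORT B =====
-- B's key stream for one column's filtered word list: 'while words: w1, *words = words; keys.append(w1); keys.extend(...)'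
def pvAltKeys : List String → List String
  | [] => []
  | w1 :: rest => w1 :: (rest.map (fun w2 => w1 ++ " " ++ w2) ++ pvAltKeys rest)

-- literal transliteration of B: filter the split words once, build the key list, then one append loop (setdefault(...).append = Dict.modify).
def build_dynamic_column_mapping_py_alt (available_columns : List String) (semantic_mappings : List (String × List String)) : List (String × List String) :=
  (available_columns.foldl (fun (m : PySem.Dict String (List String)) col =>
    let words := (PySem.Str.split₀ (PySem.Str.replace (PySem.Str.replace (PySem.Str.lower col) "_" " ") "-" " ")).filter
      (fun w => decide (2 < PySem.Str.len w))
    (pvAltKeys words).foldl (fun m key => m.modify key [] (· ++ [col])) m)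
    PySem.Dict.empty).items

-- ===== PRECONDITION & SPEC =====
def Spec_build_dynamic_column_mapping_py (available_columns : List String) (semantic_mappings : List (String × List String)) (out : List (String × List String)) : Prop := out = build_dynamic_column_mapping_py_alt available_columns semantic_mappings
instance (available_columns : List String) (semantic_mappings : List (String × List String)) (out : List (String × List String)) : Decidable (Spec_build_dynamic_column_mapping_py available_columns semantic_mappings out) := by unfold Spec_build_dynamic_column_mapping_py; infer_instance

-- ===== CLAIM (what is proved, stated in full; the proofs are below) =====
def Claim_equal_build_dynamic_column_mapping_py : Prop := ∀ (available_columns : List String) (semantic_mappings : List (String × List String)), Dom_build_dynamic_column_mapping_py available_columns semantic_mappings → Spec_build_dynamic_column_mapping_py available_columns semantic_mappings (build_dynamic_column_mapping_py available_columns semantic_mappings)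

-- ===== LEMMAS AND PROOFS =====

-- A's inner j-range loop over the full word list W, started at index s+1, is the fold of the
-- dict-update over the composites of w1 with the (length>2)-filtered tail W.drop (s+1).
theorem pv_inner_eq (W : List String) (col w1 : String) (s : Nat) (m : PySem.Dict String (List String)) :
    (PySem.List.pyRange ((s : Int) + 1) (PySem.List.len W) 1).foldl (fun m j =>
        let word2 := PySem.List.pyGetD W j ""
        if 2 < PySem.Str.len word2 then
          let composite := w1 ++ " " ++ word2
          m.insert composite (m.getD composite [] ++ [col])
        else m) m
    = (((W.drop (s + 1)).filter (fun w => decide (2 < PySem.Str.len w))).map (fun w2 => w1 ++ " " ++ w2)).foldl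
        (fun m k => m.insert k (m.getD k [] ++ [col])) m := by
  have hcast : (s : Int) + 1 = ((s + 1 : Nat) : Int) := by push_cast; ring
  have h1 := PySem.List.foldl_pyRange_pyGetD' W "" (fun m word2 =>
      if 2 < PySem.Str.len word2 then
        m.insert (w1 ++ " " ++ word2) ((m.getD (w1 ++ " " ++ word2) []) ++ [col])
      else m) m (a := ((s + 1 : Nat) : Int)) (by positivity)
  rw [Int.toNat_natCast] at h1
  have h2 : (W.drop (s + 1)).foldl (fun m word2 =>
      if 2 < PySem.Str.len word2 then
        m.insert (w1 ++ " " ++ word2) ((m.getD (w1 ++ " " ++ word2) []) ++ [col])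
      else m) m
    = (((W.drop (s + 1)).filter (fun w => decide (2 < PySem.Str.len w))).map (fun w2 => w1 ++ " " ++ w2)).foldl
        (fun m k => m.insert k (m.getD k [] ++ [col])) m := by
    rw [PySem.List.foldl_ite_eq_foldl_filter, List.foldl_map]
  rw [hcast]
  exact h1.trans h2

-- A's word1-loop (enumerate started at s over the suffix t = W.drop s) equals B's key-stream fold.
theorem pv_col_loop (W : List String) (col : String) :
    ∀ (t : List String) (s : Nat), W.drop s = t → ∀ (m : PySem.Dict String (List String)),
    (PySem.List.enumerate t (s : Int)).foldl (fun m iw =>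
        let word1 := iw.2
        if 2 < PySem.Str.len word1 then
          let m := m.insert word1 (m.getD word1 [] ++ [col])
          (PySem.List.pyRange (iw.1 + 1) (PySem.List.len W) 1).foldl (fun m j =>
            let word2 := PySem.List.pyGetD W j ""
            if 2 < PySem.Str.len word2 then
              let composite := word1 ++ " " ++ word2
              m.insert composite (m.getD composite [] ++ [col])
            else m) m
        else m) m
    = (pvAltKeys (t.filter (fun w => decide (2 < PySem.Str.len w)))).foldl
        (fun m k => m.insert k (m.getD k [] ++ [col])) m := by
  intro t
  induction t with
  | nil => intro s _ m; simp [PySem.List.enumerate_nil, pvAltKeys]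
  | cons w t' ih =>
    intro s h m
    have ht' : W.drop (s + 1) = t' := by
      rw [← List.tail_drop, h, List.tail_cons]
    simp only [PySem.List.enumerate_cons, List.foldl_cons, List.filter_cons]
    by_cases hp : 2 < PySem.Str.len w
    · simp only [hp, if_pos, decide_true]
      rw [pv_inner_eq W col w s (m.insert w (m.getD w [] ++ [col])), ht']
      simp only [pvAltKeys, List.foldl_cons, List.foldl_append]
      exact ih (s + 1) ht' _
    · simp only [hp, if_neg, not_false_iff, decide_false]
      exact ih (s + 1) ht' m

-- ===== VERDICT (by name: the statement is the Claim_ definition above) =====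
theorem build_dynamic_column_mapping_py_spec : Claim_equal_build_dynamic_column_mapping_py := by
  intro available_columns semantic_mappings _
  show build_dynamic_column_mapping_py available_columns semantic_mappings
      = build_dynamic_column_mapping_py_alt available_columns semantic_mappings
  unfold build_dynamic_column_mapping_py build_dynamic_column_mapping_py_alt
  refine congrArg PySem.Dict.items ?_
  apply PySem.List.foldl_congr_mem
  intro m col _
  refine Eq.trans (pv_col_loop (PySem.Str.split₀ (PySem.Str.replace (PySem.Str.replace (PySem.Str.lower col) "_" " ") "-" " ")) col
      (PySem.Str.split₀ (PySem.Str.replace (PySem.Str.replace (PySem.Str.lower col) "_" " ") "-" " ")) 0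
      List.drop_zero m) ?_
  rfl
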